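-- pv_equiv track=rewrite | github.com/TCtobychen/AnomalyDetection_CurveClassification | Anomaly_Detection/MA.py | get_fluc
-- ===== SOURCE A (Python) =====
-- def get_fluc(value):
-- 	N = len(value)
-- 	Dif = []
-- 	for i in range(N-1):
-- 		Dif.append(abs(value[i+1]-value[i]))
-- 	Dif.append(Dif[-1])
-- 	temp, fluc = 0, []
-- 	for i in range(5):
-- 		temp += Dif[i]
-- 		fluc.append(temp)
-- 	for i in range(5, N):
-- 		temp += Dif[i]
-- 		temp -= Dif[i-5]
-- 		fluc.append(temp)
-- 	for i in range(5):
-- 		fluc[i] = fluc[5]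
-- 	return fluc
-- ===== SOURCE B (Python) =====
-- def get_fluc(value):
--     dif = [abs(b - a) for a, b in zip(value, value[1:])]
--     dif.append(dif[-1])
--     P = [0]
--     for d in dif:
--         P.append(P[-1] + d)
--     fill = P[6] - P[1]
--     return [fill if i < 5 else P[i + 1] - P[i - 4] for i in range(len(value))]
-- ===== Notes on version B (the rewrite author's own statement) =====
-- stated objective: alternative
-- what changed: Replaces A's running sliding-window accumulator and in-place fix-up of the first five slots by a prefix-sum array: each output is a difference P[i+1]-P[i-4] of two prefix sums (fill value P[6]-P[1] for i<5), built in one comprehension.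
import Mathlib
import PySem

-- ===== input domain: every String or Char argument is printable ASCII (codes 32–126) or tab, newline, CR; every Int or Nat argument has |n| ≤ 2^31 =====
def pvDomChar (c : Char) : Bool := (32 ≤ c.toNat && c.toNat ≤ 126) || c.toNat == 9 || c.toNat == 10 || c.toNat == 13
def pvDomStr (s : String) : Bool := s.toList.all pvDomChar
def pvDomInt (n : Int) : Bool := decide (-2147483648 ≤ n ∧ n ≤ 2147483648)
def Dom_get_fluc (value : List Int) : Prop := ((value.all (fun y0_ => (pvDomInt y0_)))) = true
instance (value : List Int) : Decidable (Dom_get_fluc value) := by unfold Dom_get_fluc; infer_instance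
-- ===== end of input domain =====

-- B replaces A's running sliding-window accumulator (and the in-place fix-up of the
-- first five slots) by a prefix-sum array read off by index differences; same O(n) cost.


-- ===== PORT A =====
-- Literal transliteration of A.  All list indices that Python uses are nonnegative and
-- in range on every input admitted by Pre_ (length ≥ 6), so List.getD is exact there;
-- Dif[-1] is ported with PySem.List.pyGet? (-1) (none = IndexError, outside Pre_).
def get_fluc (value : List Int) : List Int :=
  let N := value.length
  let Dif := (List.range (N - 1)).foldl
    (fun Dif i => Dif ++ [|value.getD (i + 1) 0 - value.getD i 0|]) []
  let Dif := Dif ++ [(PySem.List.pyGet? Dif (-1)).getD 0]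
  -- temp, fluc = 0, []
  let s1 := (List.range 5).foldl
    (fun (st : Int × List Int) i =>
      let t := st.1 + Dif.getD i 0
      (t, st.2 ++ [t])) (0, [])
  let s2 := (List.range' 5 (N - 5)).foldl
    (fun (st : Int × List Int) i =>
      let t := st.1 + Dif.getD i 0 - Dif.getD (i - 5) 0
      (t, st.2 ++ [t])) s1
  -- for i in range(5): fluc[i] = fluc[5]
  (List.range 5).foldl (fun fluc i => fluc.set i (fluc.getD 5 0)) s2.2

-- ===== PORT B =====
-- Literal transliteration of B (Source B): prefix sums P, output by index differences.
-- P[-1] is ported as getLastD: P starts as [0] and only grows, so it is never empty.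
def get_fluc_alt (value : List Int) : List Int :=
  let dif := (value.zip value.tail).map (fun p => |p.2 - p.1|)
  let dif := dif ++ [(PySem.List.pyGet? dif (-1)).getD 0]
  let P := dif.foldl (fun P d => P ++ [P.getLastD 0 + d]) [0]
  let fill := P.getD 6 0 - P.getD 1 0
  (List.range value.length).map
    (fun i => if i < 5 then fill else P.getD (i + 1) 0 - P.getD (i - 4) 0)

-- ===== PRECONDITION & SPEC =====
-- Python A raises IndexError on every list of length < 6 (Dif[-1] for len < 2,
-- Dif[i] in the first loop for len < 5, fluc[5] for len = 5); B raises there too.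
def Pre_get_fluc (value : List Int) : Prop := 6 ≤ value.length
instance (value : List Int) : Decidable (Pre_get_fluc value) := by unfold Pre_get_fluc; infer_instance
def pvWitness_get_fluc : List Int := [3, 1, 4, 1, 5, 9, 2]

def Spec_get_fluc (value : List Int) (out : List Int) : Prop := out = get_fluc_alt value
instance (value : List Int) (out : List Int) : Decidable (Spec_get_fluc value out) := by unfold Spec_get_fluc; infer_instance

-- ===== CLAIM (what is proved, stated in full; the proofs are below) =====
def Claim_equal_get_fluc : Prop := ∀ (value : List Int), Dom_get_fluc value → Pre_get_fluc value → Spec_get_fluc value (get_fluc value)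

-- ===== LEMMAS AND PROOFS =====

-- the common difference list (A's Dif after the zip rewrite = B's dif)
def pvD (value : List Int) : List Int :=
  (value.zip value.tail).map (fun p => |p.2 - p.1|) ++
    [(PySem.List.pyGet? ((value.zip value.tail).map (fun p => |p.2 - p.1|)) (-1)).getD 0]

theorem pvD_length (value : List Int) (h : 1 ≤ value.length) :
    (pvD value).length = value.length := by
  simp [pvD, List.length_zip]
  omega

-- prefix sum of the first k entries of D (getD 0 past the end)
def pvS (D : List Int) : Nat → Int
  | 0 => 0
  | k + 1 => pvS D k + D.getD k 0

theorem pvS_succ (D : List Int) (k : Nat) : pvS D (k + 1) = pvS D k + D.getD k 0 := rfl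

theorem pvS_cons (d : Int) (ds : List Int) (k : Nat) :
    pvS (d :: ds) (k + 1) = d + pvS ds k := by
  induction k with
  | zero => show (0 : Int) + d = d + 0; ring
  | succ k ih =>
    show pvS (d :: ds) (k + 1) + (d :: ds).getD (k + 1) 0 = d + (pvS ds k + ds.getD k 0)
    rw [ih]
    simp [List.getD]
    ring

-- the "append one element" fold builds acc0 ++ map
theorem pv_foldl_append {α β : Type} (f : α → β) (l : List α) (acc : List β) :
    l.foldl (fun a x => a ++ [f x]) acc = acc ++ l.map f := by
  induction l generalizing acc with
  | nil => simp
  | cons x xs ih => simp [List.foldl_cons, ih]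

-- A's Dif (built over indices) equals B's dif (built over zipped pairs)
theorem pv_dif_eq (value : List Int) :
    (List.range (value.length - 1)).map (fun i => |value.getD (i + 1) 0 - value.getD i 0|)
      = (value.zip value.tail).map (fun p => |p.2 - p.1|) := by
  apply List.ext_getElem
  · simp only [List.length_map, List.length_range, List.length_zip, List.length_tail]
    omega
  · intro i h1 h2
    simp only [List.getElem_map, List.getElem_range, List.getElem_zip] at *
    have hlen : i + 1 < value.length := by simp [List.length_zip] at h2; omega
    rw [List.getElem_tail]
    rw [List.getD_eq_getElem _ _ (by omega), List.getD_eq_getElem _ _ (by omega)]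

-- the P-building fold, against pvScan
def pvScan (t : Int) : List Int → List Int
  | [] => []
  | d :: ds => (t + d) :: pvScan (t + d) ds

theorem pvScan_length (t : Int) (l : List Int) : (pvScan t l).length = l.length := by
  induction l generalizing t with
  | nil => rfl
  | cons d ds ih => simp [pvScan, ih]

theorem pv_foldP (l : List Int) : ∀ (acc : List Int) (x : Int),
    (l.foldl (fun P d => P ++ [P.getLastD 0 + d]) (acc ++ [x]))
      = (acc ++ [x]) ++ pvScan x l := by
  induction l with
  | nil => simp [pvScan]
  | cons d ds ih =>
    intro acc x
    simp only [List.foldl_cons, pvScan]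
    have h1 : (acc ++ [x]).getLastD 0 = x := by simp
    rw [h1, List.append_assoc acc [x] [x + d]]
    have := ih (acc ++ [x]) (x + d)
    simpa using this

theorem pvScan_getElem (l : List Int) : ∀ (t : Int) (k : Nat) (h : k < l.length),
    (pvScan t l)[k]'(by rw [pvScan_length]; exact h) = t + pvS l (k + 1) := by
  induction l with
  | nil => intro t k h; simp at h
  | cons d ds ih =>
    intro t k h
    cases k with
    | zero =>
      show t + d = t + pvS (d :: ds) 1
      show t + d = t + ((0 : Int) + d)
      ring
    | succ k =>
      simp only [pvScan, List.getElem_cons_succ]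
      rw [ih (t + d) k (by simpa using h), pvS_cons]
      ring

theorem pvP_getD (D : List Int) (k : Nat) (hk : k ≤ D.length) :
    (((0 : Int) :: pvScan 0 D) : List Int).getD k 0 = pvS D k := by
  cases k with
  | zero => rfl
  | succ k =>
    have hl : k < D.length := by omega
    rw [List.getD_eq_getElem _ _ (by simp [pvScan_length]; omega)]
    have : (((0 : Int) :: pvScan 0 D) : List Int)[k + 1]'(by simp [pvScan_length]; omega)
        = (pvScan 0 D)[k]'(by rw [pvScan_length]; exact hl) := by
      simp
    rw [this, pvScan_getElem D 0 k hl]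
    simp

-- A's first loop, computed out
theorem pv_fold1 (E : List Int) :
    (List.range 5).foldl
      (fun (st : Int × List Int) i => (st.1 + E.getD i 0, st.2 ++ [st.1 + E.getD i 0]))
      (0, [])
    = (pvS E 5, [pvS E 1, pvS E 2, pvS E 3, pvS E 4, pvS E 5]) := rfl

-- A's second loop: sliding-window invariant
theorem pv_fold2 (D : List Int) : ∀ (k m : Nat) (L : List Int), 5 ≤ m →
    ((List.range' m k).foldl
      (fun (st : Int × List Int) i =>
        (st.1 + D.getD i 0 - D.getD (i - 5) 0, st.2 ++ [st.1 + D.getD i 0 - D.getD (i - 5) 0]))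
      (pvS D m - pvS D (m - 5), L))
    = (pvS D (m + k) - pvS D (m + k - 5),
       L ++ (List.range' m k).map (fun i => pvS D (i + 1) - pvS D (i - 4))) := by
  intro k
  induction k with
  | zero => intro m L hm; simp
  | succ k ih =>
    intro m L hm
    rw [List.range'_succ]
    simp only [List.foldl_cons, List.map_cons]
    have ht : pvS D m - pvS D (m - 5) + D.getD m 0 - D.getD (m - 5) 0
        = pvS D (m + 1) - pvS D (m - 4) := by
      rw [pvS_succ]
      have h1 : m - 4 = (m - 5) + 1 := by omega
      rw [h1, pvS_succ]
      ring
    simp only [ht]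
    have h2 : pvS D (m + 1) - pvS D (m - 4) = pvS D (m + 1) - pvS D (m + 1 - 5) := by
      rw [show m - 4 = m + 1 - 5 from by omega]
    rw [h2, ih (m + 1) (L ++ [pvS D (m + 1) - pvS D (m + 1 - 5)]) (by omega)]
    rw [Prod.mk.injEq]
    refine ⟨by congr 2 <;> omega, ?_⟩
    rw [List.append_assoc, ← h2]
    rfl

theorem pv_fold2_five (D : List Int) (k : Nat) (L : List Int) :
    ((List.range' 5 k).foldl
      (fun (st : Int × List Int) i =>
        (st.1 + D.getD i 0 - D.getD (i - 5) 0, st.2 ++ [st.1 + D.getD i 0 - D.getD (i - 5) 0]))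
      (pvS D 5, L))
    = (pvS D (5 + k) - pvS D (5 + k - 5),
       L ++ (List.range' 5 k).map (fun i => pvS D (i + 1) - pvS D (i - 4))) := by
  have h : (pvS D 5, L) = (pvS D 5 - pvS D (5 - 5), L) := by
    rw [Prod.mk.injEq]
    refine ⟨?_, rfl⟩
    show pvS D 5 = pvS D 5 - (0 : Int)
    ring
  rw [h, pv_fold2 D k 5 L (by omega)]

-- A's result, in closed form
theorem pvA_closed (value : List Int) :
    get_fluc value =
      (List.range 5).foldl
        (fun fluc i => fluc.set i (fluc.getD 5 0))
        ([pvS (pvD value) 1, pvS (pvD value) 2, pvS (pvD value) 3, pvS (pvD value) 4,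
          pvS (pvD value) 5] ++
          (List.range' 5 (value.length - 5)).map
            (fun i => pvS (pvD value) (i + 1) - pvS (pvD value) (i - 4))) := by
  simp only [get_fluc]
  rw [pv_foldl_append, List.nil_append, pv_dif_eq]
  rw [show ((value.zip value.tail).map (fun p => |p.2 - p.1|) ++
      [(PySem.List.pyGet? ((value.zip value.tail).map (fun p => |p.2 - p.1|)) (-1)).getD 0])
      = pvD value from rfl]
  rw [pv_fold1, pv_fold2_five]

-- B's result, in closed form
theorem pvB_closed (value : List Int) (h : 6 ≤ value.length) :
    get_fluc_alt value =
      (List.range value.length).map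
        (fun i => if i < 5 then pvS (pvD value) 6 - pvS (pvD value) 1
                  else pvS (pvD value) (i + 1) - pvS (pvD value) (i - 4)) := by
  have hD : (pvD value).length = value.length := pvD_length value (by omega)
  simp only [get_fluc_alt]
  rw [show ((value.zip value.tail).map (fun p => |p.2 - p.1|) ++
      [(PySem.List.pyGet? ((value.zip value.tail).map (fun p => |p.2 - p.1|)) (-1)).getD 0])
      = pvD value from rfl]
  rw [show ([(0 : Int)] : List Int) = ([] ++ [(0 : Int)]) from rfl, pv_foldP, List.nil_append]
  rw [show (([(0 : Int)] ++ pvScan 0 (pvD value)) : List Int)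
      = ((0 : Int) :: pvScan 0 (pvD value)) from rfl]
  rw [pvP_getD (pvD value) 6 (by omega), pvP_getD (pvD value) 1 (by omega)]
  apply List.map_congr_left
  intro i hi
  rw [List.mem_range] at hi
  by_cases h5 : i < 5
  · simp [h5]
  · simp only [if_neg h5]
    rw [pvP_getD (pvD value) (i + 1) (by omega), pvP_getD (pvD value) (i - 4) (by omega)]

-- the final fix-up loop versus the direct map
theorem pv_final (D : List Int) (N : Nat) (h6 : 6 ≤ N) :
    (List.range 5).foldl (fun fluc i => fluc.set i (fluc.getD 5 0))
        ([pvS D 1, pvS D 2, pvS D 3, pvS D 4, pvS D 5] ++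
          (List.range' 5 (N - 5)).map (fun i => pvS D (i + 1) - pvS D (i - 4)))
      = (List.range N).map
          (fun i => if i < 5 then pvS D 6 - pvS D 1
                    else pvS D (i + 1) - pvS D (i - 4)) := by
  obtain ⟨k, hk⟩ : ∃ k, N - 5 = k + 1 := ⟨N - 6, by omega⟩
  set F : List Int := [pvS D 1, pvS D 2, pvS D 3, pvS D 4, pvS D 5] ++
      (List.range' 5 (N - 5)).map (fun i => pvS D (i + 1) - pvS D (i - 4)) with hF
  have hFlen : F.length = N := by simp [hF]; omega
  have hF5 : F.getD 5 0 = pvS D 6 - pvS D 1 := by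
    rw [hF, hk, List.range'_succ]
    rfl
  have hr5 : List.range 5 = [0, 1, 2, 3, 4] := rfl
  rw [hr5]
  simp only [List.foldl_cons, List.foldl_nil]
  -- the repeated fluc.getD 5 0 reads are unaffected by the sets at indices < 5
  have hset : ∀ (l : List Int) (j : Nat) (a : Int), j < 5 → 5 < l.length →
      (l.set j a).getD 5 0 = l.getD 5 0 := by
    intro l j a hj hl
    rw [List.getD_eq_getElem _ _ (by simp; omega), List.getD_eq_getElem _ _ hl,
        List.getElem_set]
    simp [Nat.ne_of_lt hj]
  have hl0 : 5 < F.length := by omega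
  have g0 : (F.set 0 (F.getD 5 0)).getD 5 0 = F.getD 5 0 :=
    hset F 0 _ (by omega) hl0
  rw [g0]
  have g1 : ((F.set 0 (F.getD 5 0)).set 1 (F.getD 5 0)).getD 5 0 = F.getD 5 0 := by
    rw [hset _ 1 _ (by omega) (by simpa using hl0), g0]
  rw [g1]
  have g2 : (((F.set 0 (F.getD 5 0)).set 1 (F.getD 5 0)).set 2 (F.getD 5 0)).getD 5 0
      = F.getD 5 0 := by
    rw [hset _ 2 _ (by omega) (by simpa using hl0), g1]
  rw [g2]
  have g3 : ((((F.set 0 (F.getD 5 0)).set 1 (F.getD 5 0)).set 2 (F.getD 5 0)).set 3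
      (F.getD 5 0)).getD 5 0 = F.getD 5 0 := by
    rw [hset _ 3 _ (by omega) (by simpa using hl0), g2]
  rw [g3, hF5]
  apply List.ext_getElem
  · simp [hFlen]
  · intro i hi1 hi2
    simp only [List.getElem_set, List.getElem_map, List.getElem_range]
    by_cases h5 : i < 5
    · interval_cases i <;> simp
    · rw [if_neg (by omega), if_neg (by omega), if_neg (by omega), if_neg (by omega),
          if_neg (by omega), if_neg h5]
      have hi5 : 5 ≤ i := by omega
      simp only [hF]
      rw [List.getElem_append_right (by simp; omega)]
      simp only [List.getElem_map, List.getElem_range', List.length_cons,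
        List.length_append, List.length_map]
      have h1 : 5 + 1 * (i - (List.length ([] : List Int) + 1 + 1 + 1 + 1 + 1)) = i := by
        simp; omega
      rw [h1]

-- ===== VERDICT (by name: the statement is the Claim_ definition above) =====
theorem get_fluc_spec : Claim_equal_get_fluc := by
  intro value _ hpre
  unfold Spec_get_fluc
  unfold Pre_get_fluc at hpre
  rw [pvA_closed value, pvB_closed value hpre, pv_final (pvD value) value.length hpre]
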